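-- pv_equiv track=rewrite | github.com/loning/mbook-binary | src/binaryuniverse/tests/test_P6.py | _apply_phi_correction
-- ===== SOURCE A (Python) =====
-- def _apply_phi_correction(pattern: str) -> str:
--     """应用φ-修正以维持约束"""
--     corrected = ""
--     i = 0
--
--     while i < len(pattern):
--         if i < len(pattern) - 1 and pattern[i] == '1' and pattern[i+1] == '1':
--             # 替换"11"为"10"以满足no-11约束
--             corrected += "10"
--             i += 2
--         else:
--             corrected += pattern[i]
--             i += 1
--
--     return corrected
-- ===== SOURCE B (Python) =====
-- def _apply_phi_correction(pattern: str) -> str: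
--     # single pass state machine: parity flag for the current run of '1's
--     out = []
--     odd = False
--     for ch in pattern:
--         if ch == '1':
--             out.append('0' if odd else '1')
--             odd = not odd
--         else:
--             out.append(ch)
--             odd = False
--     return ''.join(out)
-- ===== Notes on version B (the rewrite author's own statement) =====
-- stated objective: faster
-- what changed: Replaces A's index loop with two-character lookahead, variable step and repeated string concatenation by a single per-character state machine keeping a parity flag for the current run of '1's, accumulating into a list joined once.
import Mathlib
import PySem

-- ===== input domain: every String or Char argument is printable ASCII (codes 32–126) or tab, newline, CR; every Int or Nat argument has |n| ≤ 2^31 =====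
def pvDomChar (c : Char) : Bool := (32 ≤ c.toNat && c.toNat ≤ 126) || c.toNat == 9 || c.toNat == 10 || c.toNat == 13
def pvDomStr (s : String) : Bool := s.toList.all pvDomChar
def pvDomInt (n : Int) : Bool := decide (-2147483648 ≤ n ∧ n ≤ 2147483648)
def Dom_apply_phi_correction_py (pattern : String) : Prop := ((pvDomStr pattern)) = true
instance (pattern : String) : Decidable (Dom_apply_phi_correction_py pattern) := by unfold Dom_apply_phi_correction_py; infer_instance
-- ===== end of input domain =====

-- ===== PORT A =====
-- A scans with index i, two-char lookahead: "11" -> "10" step 2, else copy step 1.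
def loopA : List Char → List Char
  | [] => []
  | [c] => [c]
  | c1 :: c2 :: rest =>
      if c1 = '1' ∧ c2 = '1' then '1' :: '0' :: loopA rest
      else c1 :: loopA (c2 :: rest)
termination_by l => l.length
decreasing_by all_goals (simp only [List.length_cons]; omega)

def apply_phi_correction_py (pattern : String) : String :=
  String.mk (loopA pattern.toList)

-- ===== PORT B =====
-- B emits per character with a parity flag `odd` for the current run of '1's.
def loopB (odd : Bool) : List Char → List Char
  | [] => []
  | c :: rest =>
      if c = '1' then (if odd then '0' else '1') :: loopB (!odd) rest
      else c :: loopB false rest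

def apply_phi_correction_py_alt (pattern : String) : String :=
  String.mk (loopB false pattern.toList)

-- ===== PRECONDITION & SPEC =====
def Spec_apply_phi_correction_py (pattern : String) (out : String) : Prop := out = apply_phi_correction_py_alt pattern
instance (pattern : String) (out : String) : Decidable (Spec_apply_phi_correction_py pattern out) := by unfold Spec_apply_phi_correction_py; infer_instance

-- ===== CLAIM (what is proved, stated in full; the proofs are below) =====
def Claim_equal_apply_phi_correction_py : Prop := ∀ (pattern : String), Dom_apply_phi_correction_py pattern → Spec_apply_phi_correction_py pattern (apply_phi_correction_py pattern)

-- ===== LEMMAS AND PROOFS =====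

-- ===== VERDICT (by name: the statement is the Claim_ definition above) =====
theorem loopA_eq_loopB (l : List Char) : loopA l = loopB false l := by
  fun_induction loopA l with
  | case1 => rfl
  | case2 c => by_cases h : c = '1' <;> simp [loopB, h]
  | case3 c1 c2 rest h ih =>
      obtain ⟨h1, h2⟩ := h
      subst h1; subst h2
      simp [loopB, ih]
  | case4 c1 c2 rest h ih =>
      by_cases h1 : c1 = '1'
      · have h2 : c2 ≠ '1' := fun h2 => h ⟨h1, h2⟩
        subst h1
        rw [ih]
        simp [loopB, h2]
      · simp [loopB, h1]; exact ih

theorem apply_phi_correction_py_spec : Claim_equal_apply_phi_correction_py := by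
  intro pattern _
  unfold Spec_apply_phi_correction_py apply_phi_correction_py apply_phi_correction_py_alt
  rw [loopA_eq_loopB]
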